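-- pv_equiv track=rewrite | github.com/mnaayhqarqoor/- | mainMC.py | divide_with_remainder
-- ===== SOURCE A (Python) =====
-- def divide_with_remainder(numbers):
--     if len(numbers) < 2:
--         return "يجب إدخال رقمين على الأقل للقسمة."
--
--     quotient = numbers[0]
--     remainder = 0
--     for num in numbers[1:]:
--         if num == 0:
--             return "خطأ: لا يمكن القسمة على صفر"
--         quotient, remainder = divmod(quotient, num)
--     return quotient, remainder
-- ===== SOURCE B (Python) =====
-- def divide_with_remainder(numbers):
--     if len(numbers) < 2:
--         return "يجب إدخال رقمين على الأقل للقسمة."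
--     if 0 in numbers[1:]:
--         return "خطأ: لا يمكن القسمة على صفر"
--
--     def quot(x, ds):
--         # quotient of x successively floor-divided by every d in ds,
--         # computed by splitting ds in half (divide and conquer)
--         if len(ds) <= 1:
--             return x // ds[0] if ds else x
--         mid = len(ds) // 2
--         return quot(quot(x, ds[:mid]), ds[mid:])
--
--     q = quot(numbers[0], numbers[1:-1])
--     last = numbers[-1]
--     return q // last, q % last
-- ===== Notes on version B (the rewrite author's own statement) =====
-- stated objective: alternative
-- what changed: A makes one linear pass carrying a (quotient, remainder) pair with an inline zero-check per step; B validates divisors once, then computes the running quotient by divide-and-conquer recursion on the divisor list (splitting it in half) and derives the remainder only in a final // and % step.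
-- outside the precondition, e.g. on divide_with_remainder([10, 0]): A returns 'خطأ: لا يمكن القسمة على صفر', B returns 'خطأ: لا يمكن القسمة على صفر'
import Mathlib
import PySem

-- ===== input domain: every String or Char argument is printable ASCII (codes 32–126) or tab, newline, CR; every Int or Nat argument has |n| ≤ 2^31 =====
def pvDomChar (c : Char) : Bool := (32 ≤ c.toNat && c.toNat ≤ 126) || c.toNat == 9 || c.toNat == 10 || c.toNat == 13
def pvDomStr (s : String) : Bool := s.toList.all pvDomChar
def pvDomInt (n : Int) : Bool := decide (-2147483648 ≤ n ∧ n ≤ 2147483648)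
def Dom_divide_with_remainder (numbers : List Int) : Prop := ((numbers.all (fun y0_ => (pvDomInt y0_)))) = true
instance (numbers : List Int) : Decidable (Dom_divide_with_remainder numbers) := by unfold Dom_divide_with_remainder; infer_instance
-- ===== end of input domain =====

-- B replaces A's linear pass over a (quotient, remainder) pair (zero-check then divmod at each
-- step) by an upfront divisor validation, a divide-and-conquer recursion computing the running
-- quotient alone, and a final single //,% step (objective: alternative).


-- ===== PORT A =====
-- A's loop: at each element, check for zero, then divmod; (0,0) stands in where the
-- Python returns an error string (those inputs are outside Pre_).
def divAloop (q r : Int) : List Int → Int × Int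
  | [] => (q, r)
  | num :: rest =>
      if num == 0 then (0, 0)
      else divAloop (PySem.Int.floordiv q num) (PySem.Int.mod q num) rest

def divide_with_remainder (numbers : List Int) : Int × Int :=
  if numbers.length < 2 then (0, 0)
  else
    match numbers with
    | [] => (0, 0)
    | x :: rest => divAloop x 0 rest

-- ===== PORT B =====
-- B's quot: divide-and-conquer over the divisor list (the empty-list branch is x, matching
-- Source B where quot is only ever reached with the list shapes it handles).
def quotB (x : Int) (ds : List Int) : Int :=
  if h : ds.length ≤ 1 then
    match ds with
    | [] => x
    | [d] => PySem.Int.floordiv x d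
  else
    let mid := ds.length / 2
    quotB (quotB x (ds.take mid)) (ds.drop mid)
termination_by ds.length
decreasing_by
  · simp only [List.length_take]; omega
  · simp only [List.length_drop]; omega

def divide_with_remainder_alt (numbers : List Int) : Int × Int :=
  if numbers.length < 2 then (0, 0)
  else
    match numbers with
    | [] => (0, 0)
    | x :: rest =>
        if rest.contains 0 then (0, 0)
        else
          let q := quotB x rest.dropLast   -- numbers[1:-1]
          let last := rest.getLast?.getD 0 -- numbers[-1]; rest is nonempty here
          (PySem.Int.floordiv q last, PySem.Int.mod q last)

-- ===== PRECONDITION & SPEC =====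
-- Pre_ excludes inputs where Python A returns an error STRING instead of an int pair:
-- fewer than two numbers, or a zero divisor in the tail.
def Pre_divide_with_remainder (numbers : List Int) : Prop :=
  2 ≤ numbers.length ∧ ∀ n ∈ numbers.drop 1, n ≠ 0

instance (numbers : List Int) : Decidable (Pre_divide_with_remainder numbers) := by
  unfold Pre_divide_with_remainder; infer_instance

def pvWitness_divide_with_remainder : List Int := [17, 3, 2]

def Spec_divide_with_remainder (numbers : List Int) (out : Int × Int) : Prop := out = divide_with_remainder_alt numbers
instance (numbers : List Int) (out : Int × Int) : Decidable (Spec_divide_with_remainder numbers out) := by unfold Spec_divide_with_remainder; infer_instance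

-- ===== CLAIM (what is proved, stated in full; the proofs are below) =====
def Claim_equal_divide_with_remainder : Prop := ∀ (numbers : List Int), Dom_divide_with_remainder numbers → Pre_divide_with_remainder numbers → Spec_divide_with_remainder numbers (divide_with_remainder numbers)

-- ===== LEMMAS AND PROOFS =====
-- B's divide-and-conquer quotient equals the left fold of floor division.
theorem quotB_eq_foldl (ds : List Int) (x : Int) :
    quotB x ds = ds.foldl (fun q d => PySem.Int.floordiv q d) x := by
  induction hn : ds.length using Nat.strong_induction_on generalizing ds x with
  | _ n ih =>
    by_cases h : ds.length ≤ 1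
    · match ds with
      | [] => simp [quotB]
      | [d] => simp [quotB]
      | a :: b :: t => simp at h
    · rw [quotB, dif_neg h]
      have hmid : ds.length / 2 < ds.length := by omega
      have h1 : (ds.take (ds.length / 2)).length < n := by
        simp only [List.length_take]; omega
      have h2 : (ds.drop (ds.length / 2)).length < n := by
        simp only [List.length_drop]; omega
      show quotB (quotB x (ds.take (ds.length / 2))) (ds.drop (ds.length / 2)) = _
      rw [ih _ h1 _ _ rfl, ih _ h2 _ _ rfl]
      rw [← List.foldl_append, List.take_append_drop]

-- A's loop on a nonzero divisor list init ++ [last] yields the final divmod of the folded quotient.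
theorem divAloop_concat (init : List Int) (last q r : Int)
    (h : ∀ n ∈ init ++ [last], n ≠ 0) :
    divAloop q r (init ++ [last]) =
      (PySem.Int.floordiv (init.foldl (fun a d => PySem.Int.floordiv a d) q) last,
       PySem.Int.mod (init.foldl (fun a d => PySem.Int.floordiv a d) q) last) := by
  induction init generalizing q r with
  | nil =>
      have hl : last ≠ 0 := h last (by simp)
      simp [divAloop, hl]
  | cons d t ih =>
      have hd : d ≠ 0 := h d (by simp)
      simp only [List.cons_append, divAloop, beq_iff_eq, if_neg hd, List.foldl_cons]
      exact ih _ _ (fun n hn => h n (by simp at hn ⊢; tauto))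

-- ===== VERDICT (by name: the statement is the Claim_ definition above) =====
theorem divide_with_remainder_spec : Claim_equal_divide_with_remainder := by
  intro numbers _ hpre
  obtain ⟨hlen, hnz⟩ := hpre
  unfold Spec_divide_with_remainder divide_with_remainder divide_with_remainder_alt
  have hnl : ¬ numbers.length < 2 := by omega
  match numbers with
  | [] => simp at hlen
  | x :: rest =>
      simp only [if_neg hnl]
      have hz : ∀ n ∈ rest, n ≠ 0 := by
        intro n hn; exact hnz n (by simpa using hn)
      have hrest : rest ≠ [] := by
        intro h; subst h; simp at hlen
      have hcon : rest.contains 0 = false := by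
        simp only [List.contains_eq_any_beq, List.any_eq_false]
        intro n hn
        have := hz n hn
        simp only [beq_iff_eq]
        omega
      simp only [hcon, Bool.false_eq_true, if_false]
      obtain ⟨init, last, rfl⟩ : ∃ init last, rest = init ++ [last] := by
        refine ⟨rest.dropLast, rest.getLast hrest, ?_⟩
        exact (List.dropLast_append_getLast hrest).symm
      rw [divAloop_concat init last x 0 hz]
      rw [List.dropLast_concat, List.getLast?_concat, quotB_eq_foldl]
      rfl
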